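-- pv_equiv track=rewrite | github.com/HantigC/dancing-dots | plycam/utils/__init__.py | extract_kwargs
-- ===== SOURCE A (Python) =====
-- def extract_kwargs(
--     kwargs: dict[str],
--     what_dict: list[str] | str,
--     merge: bool = False,
-- ) -> tuple[dict[str, dict], dict]:
--     if not isinstance(what_dict, list):
--         what_dict = [what_dict]
--
--     what_dict = {w: {} for w in what_dict}
--     left_dict = {}
--     for k, v in kwargs.items():
--         try:
--             group, name = k.split(":", 1)
--         except ValueError:
--             if merge:
--                 for wv in what_dict.values():
--                     wv[k] = v
--             else:
--                 left_dict[k] = v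
--         else:
--             group_dict = what_dict.get(group)
--             if group_dict is not None:
--                 group_dict[name] = v
--             else:
--                 if merge:
--                     for wv in what_dict.values():
--                         wv[k] = v
--                 else:
--                     left_dict[k] = v
--     if merge:
--         return what_dict
--     return what_dict, left_dict
-- ===== SOURCE B (Python) =====
-- def extract_kwargs(
--     kwargs,
--     what_dict,
--     merge=False,
-- ):
--     if not isinstance(what_dict, list):
--         what_dict = [what_dict]
--     names = set(what_dict)
--     # one classification pass: tag each entry as matched-to-a-group or common
--     events = []  # (tag, key, value); tag is the group name, or None for common
--     for k, v in kwargs.items():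
--         group, sep, name = k.partition(":")
--         if sep and group in names:
--             events.append((group, name, v))
--         else:
--             events.append((None, k, v))
--     if merge:
--         return {w: {key: val for g, key, val in events if g == w or g is None}
--                 for w in what_dict}
--     return ({w: {key: val for g, key, val in events if g == w} for w in what_dict},
--             {key: val for g, key, val in events if g is None})
-- ===== Notes on version B (the rewrite author's own statement) =====
-- stated objective: alternative
-- what changed: B replaces A's per-key dispatch into pre-created mutable group dicts (with a try/except around split) by a single classification pass that tags every kwargs entry as matched-(group,name,value) or common, then assembles each output dict by a comprehension over the tagged event list.
-- outside the precondition, e.g. on extract_kwargs({'a': '1', 'g:a': '2'}, ['g'], True): A returns {'g': {'a': '2'}}, B returns {'g': {'a': '2'}}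
import Mathlib
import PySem

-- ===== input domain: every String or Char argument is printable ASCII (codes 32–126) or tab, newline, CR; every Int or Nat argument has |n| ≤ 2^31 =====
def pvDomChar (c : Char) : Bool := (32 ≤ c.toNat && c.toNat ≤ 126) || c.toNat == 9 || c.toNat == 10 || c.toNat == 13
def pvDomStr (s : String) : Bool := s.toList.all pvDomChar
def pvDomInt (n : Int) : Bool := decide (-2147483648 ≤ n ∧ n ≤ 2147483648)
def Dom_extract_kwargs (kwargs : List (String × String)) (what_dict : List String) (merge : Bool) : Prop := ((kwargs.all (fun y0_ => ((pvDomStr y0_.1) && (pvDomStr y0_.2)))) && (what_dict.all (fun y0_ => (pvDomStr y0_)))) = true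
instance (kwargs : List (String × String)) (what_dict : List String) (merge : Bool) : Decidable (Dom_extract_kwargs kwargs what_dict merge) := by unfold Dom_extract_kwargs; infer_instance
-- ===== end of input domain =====

-- B does one classification pass tagging every kwargs entry (matched vs common) and then assembles each
-- output dict from the tagged event list, instead of A's per-key dispatch into pre-created mutable dicts:
-- an alternative decomposition, same cost.

-- ===== PORT A =====
-- loop body of A's `for k, v in kwargs.items()` (state = (what_dict-as-dict, left_dict));
-- `group, name = k.split(":", 1)` raises ValueError exactly when the split has one piece (the `| _` arm).
def extract_kwargs_stepA (merge : Bool)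
    (st : PySem.Dict String (PySem.Dict String String) × PySem.Dict String String)
    (kv : String × String) :
    PySem.Dict String (PySem.Dict String String) × PySem.Dict String String :=
  match PySem.Str.splitMax? kv.1 ":" 1 with
  | some [group, name] =>
      match st.1.get? group with
      | some _ =>
          -- group_dict[name] = v  (in-place mutation of the looked-up dict)
          (st.1.modify group PySem.Dict.empty (fun gd => gd.insert name kv.2), st.2)
      | none =>
          if merge then
            -- for wv in what_dict.values(): wv[k] = v
            (PySem.Dict.mk (st.1.items.map (fun p => (p.1, p.2.insert kv.1 kv.2))), st.2)
          else (st.1, st.2.insert kv.1 kv.2)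
  | _ =>
      if merge then
        (PySem.Dict.mk (st.1.items.map (fun p => (p.1, p.2.insert kv.1 kv.2))), st.2)
      else (st.1, st.2.insert kv.1 kv.2)

def extract_kwargs (kwargs : List (String × String)) (what_dict : List String) (merge : Bool) :
    (List (String × List (String × String))) × (List (String × String)) :=
  -- what_dict = {w: {} for w in what_dict}
  let what0 : PySem.Dict String (PySem.Dict String String) :=
    what_dict.foldl (fun d w => d.insert w PySem.Dict.empty) PySem.Dict.empty
  let res := kwargs.foldl (extract_kwargs_stepA merge) (what0, PySem.Dict.empty)
  if merge then
    -- Python returns the bare dict here (no tuple): not a value of the declared return type,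
    -- so merge = true lies outside Pre_; [] stands for the absent second component.
    (res.1.items.map (fun p => (p.1, p.2.items)), [])
  else (res.1.items.map (fun p => (p.1, p.2.items)), res.2.items)

-- ===== PORT B =====
-- B's classification of one entry: `group, sep, name = k.partition(":")` finds a separator
-- exactly when the maxsplit-1 split has two pieces; tag = some group (matched) or none (common).
def extract_kwargs_classify (names : List String) (kv : String × String) :
    Option String × String × String :=
  match PySem.Str.splitMax? kv.1 ":" 1 with
  | some [group, name] =>
      if names.contains group then (some group, name, kv.2) else (none, kv.1, kv.2)
  | _ => (none, kv.1, kv.2)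

-- {key: val for g, key, val in events if g == w}
def extract_kwargs_group (events : List (Option String × String × String)) (w : String) :
    PySem.Dict String String :=
  PySem.Dict.ofList ((events.filter (fun t => t.1 == some w)).map (fun t => (t.2.1, t.2.2)))

-- {key: val for g, key, val in events if g == w or g is None}
def extract_kwargs_mgroup (events : List (Option String × String × String)) (w : String) :
    PySem.Dict String String :=
  PySem.Dict.ofList ((events.filter (fun t => t.1 == some w || t.1 == none)).map (fun t => (t.2.1, t.2.2)))

-- {key: val for g, key, val in events if g is None}
def extract_kwargs_common (events : List (Option String × String × String)) :
    PySem.Dict String String :=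
  PySem.Dict.ofList ((events.filter (fun t => t.1 == none)).map (fun t => (t.2.1, t.2.2)))

def extract_kwargs_alt (kwargs : List (String × String)) (what_dict : List String) (merge : Bool) :
    (List (String × List (String × String))) × (List (String × String)) :=
  let names : List String := PySem.Set.ofList what_dict
  -- events = []; for k, v in kwargs.items(): events.append(classify)
  let events := kwargs.foldl (fun es kv => es ++ [extract_kwargs_classify names kv]) []
  if merge then
    -- Python B returns the bare merged dict here (like A): outside Pre_, [] as above.
    ((what_dict.foldl (fun d w => d.insert w (extract_kwargs_mgroup events w))
        PySem.Dict.empty).items.map (fun p => (p.1, p.2.items)), [])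
  else
    ((what_dict.foldl (fun d w => d.insert w (extract_kwargs_group events w))
        PySem.Dict.empty).items.map (fun p => (p.1, p.2.items)),
     (extract_kwargs_common events).items)

-- ===== PRECONDITION & SPEC =====
-- Pre_ excludes merge = true ONLY because Python A returns a bare dict there, not a value of the
-- declared (dict, dict) tuple return type, so no tuple value can be claimed; B returns the IDENTICAL
-- bare dict there (same keys, values and insertion order), as the cite shows.
def Pre_extract_kwargs (kwargs : List (String × String)) (what_dict : List String) (merge : Bool) : Prop :=
  merge = false
instance (kwargs : List (String × String)) (what_dict : List String) (merge : Bool) : Decidable (Pre_extract_kwargs kwargs what_dict merge) := by unfold Pre_extract_kwargs; infer_instance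

def pvWitness_extract_kwargs : (List (String × String)) × List String × Bool :=
  ([("a:x", "1"), ("y", "2"), ("b:z", "3")], ["a", "c"], false)

def Spec_extract_kwargs (kwargs : List (String × String)) (what_dict : List String) (merge : Bool) (out : (List (String × List (String × String))) × (List (String × String))) : Prop := out = extract_kwargs_alt kwargs what_dict merge
instance (kwargs : List (String × String)) (what_dict : List String) (merge : Bool) (out : (List (String × List (String × String))) × (List (String × String))) : Decidable (Spec_extract_kwargs kwargs what_dict merge out) := by unfold Spec_extract_kwargs; infer_instance

-- ===== CLAIM (what is proved, stated in full; the proofs are below) =====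
def Claim_equal_extract_kwargs : Prop := ∀ (kwargs : List (String × String)) (what_dict : List String) (merge : Bool), Dom_extract_kwargs kwargs what_dict merge → Pre_extract_kwargs kwargs what_dict merge → Spec_extract_kwargs kwargs what_dict merge (extract_kwargs kwargs what_dict merge)

-- ===== LEMMAS AND PROOFS =====

-- B's event loop appends state-independently: the fold is the map.
lemma extract_kwargs_events_eq (names : List String) :
    ∀ (kwargs : List (String × String)) (es : List (Option String × String × String)),
      kwargs.foldl (fun es kv => es ++ [extract_kwargs_classify names kv]) es
        = es ++ kwargs.map (extract_kwargs_classify names) := by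
  intro kwargs
  induction kwargs with
  | nil => simp
  | cons kv tl ih => intro es; simp [ih]

-- A fold of key-determined inserts over a dict whose items already are `keys.map (k, f k)`
-- produces items `(Set.update keys wd).map (k, f k)`.
lemma extract_kwargs_items_build (f : String → PySem.Dict String String) :
    ∀ (wd : List String) (d : PySem.Dict String (PySem.Dict String String)),
      d.keys.Nodup → d.items = d.keys.map (fun k => (k, f k)) →
      (wd.foldl (fun d w => d.insert w (f w)) d).items
        = (PySem.Set.update d.keys wd).map (fun k => (k, f k)) := by
  intro wd
  induction wd with
  | nil => intro d _ hit; simpa [PySem.Set.update] using hit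
  | cons w tl ih =>
    intro d hnd hit
    simp only [List.foldl_cons]
    have hupd : PySem.Set.update d.keys (w :: tl) = PySem.Set.update (PySem.Set.add d.keys w) tl := rfl
    by_cases hc : d.contains w = true
    · have hmem : w ∈ d.keys := (PySem.Dict.contains_iff_mem_keys d w).mp hc
      have hkeys : (d.insert w (f w)).keys = d.keys := PySem.Dict.keys_insert_of_contains d (f w) hc
      have hadd : PySem.Set.add d.keys w = d.keys := by
        simp [PySem.Set.add, hmem]
      have hit' : (d.insert w (f w)).items = (d.insert w (f w)).keys.map (fun k => (k, f k)) := by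
        rw [PySem.Dict.items_insert_of_contains d (f w) hc, hkeys, hit, List.map_map]
        apply List.map_congr_left
        intro k _
        by_cases hkw : k = w <;> simp [hkw]
      rw [ih (d.insert w (f w)) (hkeys ▸ hnd) hit', hkeys, hupd, hadd]
    · have hcf : d.contains w = false := by simpa using hc
      have hmem : w ∉ d.keys := fun hm => hc ((PySem.Dict.contains_iff_mem_keys d w).mpr hm)
      have hkeys : (d.insert w (f w)).keys = d.keys ++ [w] :=
        PySem.Dict.keys_insert_of_not_contains d (f w) hcf
      have hadd : PySem.Set.add d.keys w = d.keys ++ [w] := by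
        simp [PySem.Set.add, hmem]
      have hnd' : (d.insert w (f w)).keys.Nodup := PySem.Dict.nodup_keys_insert d w (f w) hnd
      have hit' : (d.insert w (f w)).items = (d.insert w (f w)).keys.map (fun k => (k, f k)) := by
        rw [PySem.Dict.items_insert_of_not_contains d (f w) hcf, hkeys, hit, List.map_append]
        simp
      rw [ih (d.insert w (f w)) hnd' hit', hkeys, hupd, hadd]

-- Appending one matched event updates exactly its group's dict and leaves the common dict alone.
lemma extract_kwargs_group_append (es : List (Option String × String × String)) (g n v w : String) :
    extract_kwargs_group (es ++ [(some g, n, v)]) w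
      = if g = w then (extract_kwargs_group es w).insert n v else extract_kwargs_group es w := by
  by_cases h : g = w
  · subst h
    simp [extract_kwargs_group, List.filter_append, PySem.Dict.ofList, PySem.Dict.update, List.foldl_append]
  · have : (some g == some w) = false := by simpa using h
    simp [extract_kwargs_group, List.filter_append, this, h]

lemma extract_kwargs_common_append_matched (es : List (Option String × String × String)) (g n v : String) :
    extract_kwargs_common (es ++ [(some g, n, v)]) = extract_kwargs_common es := by
  simp [extract_kwargs_common, List.filter_append]

-- Appending one common event updates the common dict and leaves every group dict alone.
lemma extract_kwargs_group_append_common (es : List (Option String × String × String)) (k v w : String) :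
    extract_kwargs_group (es ++ [(none, k, v)]) w = extract_kwargs_group es w := by
  simp [extract_kwargs_group, List.filter_append]

lemma extract_kwargs_common_append_common (es : List (Option String × String × String)) (k v : String) :
    extract_kwargs_common (es ++ [(none, k, v)]) = (extract_kwargs_common es).insert k v := by
  simp [extract_kwargs_common, List.filter_append, PySem.Dict.ofList, PySem.Dict.update, List.foldl_append]

-- Main loop invariant: A's (groups, left) state is determined by B's tagged event list.
lemma extract_kwargs_loop_eq (wd : List String) :
    ∀ (kwargs : List (String × String)) (es : List (Option String × String × String))
      (G : PySem.Dict String (PySem.Dict String String)) (L : PySem.Dict String String),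
      G.items = (PySem.Set.ofList wd).map (fun w => (w, extract_kwargs_group es w)) →
      L = extract_kwargs_common es →
      ((kwargs.foldl (extract_kwargs_stepA false) (G, L)).1.items
          = (PySem.Set.ofList wd).map
              (fun w => (w, extract_kwargs_group
                (es ++ kwargs.map (extract_kwargs_classify (PySem.Set.ofList wd))) w))
        ∧ (kwargs.foldl (extract_kwargs_stepA false) (G, L)).2
          = extract_kwargs_common
              (es ++ kwargs.map (extract_kwargs_classify (PySem.Set.ofList wd)))) := by
  intro kwargs
  induction kwargs with
  | nil => intro es G L h hl; simpa using ⟨h, hl⟩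
  | cons kv tl ih =>
    intro es G L h hl
    have hkeys : G.keys = PySem.Set.ofList wd := by
      simp [PySem.Dict.keys, h, List.map_map, Function.comp_def]
    simp only [List.foldl_cons, List.map_cons]
    have hcons : ∀ e tlm, es ++ e :: tlm = (es ++ [e]) ++ tlm := by intro e tlm; simp
    rcases hs : PySem.Str.splitMax? kv.1 ":" 1 with _ | l
    · rw [show extract_kwargs_stepA false (G, L) kv = (G, L.insert kv.1 kv.2) by
          simp [extract_kwargs_stepA, hs],
        show extract_kwargs_classify (PySem.Set.ofList wd) kv = (none, kv.1, kv.2) by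
          simp [extract_kwargs_classify, hs],
        hcons]
      exact ih (es ++ [(none, kv.1, kv.2)]) G _
        (by rw [h]; apply List.map_congr_left; intro w _; rw [extract_kwargs_group_append_common])
        (by rw [hl, extract_kwargs_common_append_common])
    · rcases l with _ | ⟨g, _ | ⟨n, _ | ⟨x, xs⟩⟩⟩
      · rw [show extract_kwargs_stepA false (G, L) kv = (G, L.insert kv.1 kv.2) by
            simp [extract_kwargs_stepA, hs],
          show extract_kwargs_classify (PySem.Set.ofList wd) kv = (none, kv.1, kv.2) by
            simp [extract_kwargs_classify, hs],
          hcons]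
        exact ih (es ++ [(none, kv.1, kv.2)]) G _
          (by rw [h]; apply List.map_congr_left; intro w _; rw [extract_kwargs_group_append_common])
          (by rw [hl, extract_kwargs_common_append_common])
      · rw [show extract_kwargs_stepA false (G, L) kv = (G, L.insert kv.1 kv.2) by
            simp [extract_kwargs_stepA, hs],
          show extract_kwargs_classify (PySem.Set.ofList wd) kv = (none, kv.1, kv.2) by
            simp [extract_kwargs_classify, hs],
          hcons]
        exact ih (es ++ [(none, kv.1, kv.2)]) G _
          (by rw [h]; apply List.map_congr_left; intro w _; rw [extract_kwargs_group_append_common])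
          (by rw [hl, extract_kwargs_common_append_common])
      · -- the two-piece case: group g, name n
        by_cases hg : g ∈ PySem.Set.ofList wd
        · have hgk : g ∈ G.keys := by rw [hkeys]; exact hg
          have hcont : G.contains g = true := (PySem.Dict.contains_iff_mem_keys G g).mpr hgk
          obtain ⟨gd, hgd⟩ : ∃ gd, G.get? g = some gd := by
            cases hgo : G.get? g with
            | none => exact absurd ((PySem.Dict.get?_eq_none_iff_not_mem_keys G g).mp hgo) (by simpa using hgk)
            | some gd => exact ⟨gd, rfl⟩
          have hGg : G.getD g PySem.Dict.empty = extract_kwargs_group es g := by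
            apply PySem.Dict.getD_of_mem_items
            · rw [h]; exact List.mem_map.mpr ⟨g, hg, rfl⟩
            · rw [hkeys]; exact PySem.Set.nodup_ofList wd
          rw [show extract_kwargs_stepA false (G, L) kv
                = (G.insert g ((extract_kwargs_group es g).insert n kv.2), L) by
              simp [extract_kwargs_stepA, hs, hgd, PySem.Dict.modify, hGg],
            show extract_kwargs_classify (PySem.Set.ofList wd) kv = (some g, n, kv.2) by
              simp [extract_kwargs_classify, hs, hg],
            hcons]
          apply ih
          · rw [PySem.Dict.items_insert_of_contains G _ hcont, h, List.map_map]
            apply List.map_congr_left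
            intro w _
            by_cases hw : w = g
            · subst hw
              simp [extract_kwargs_group_append]
            · have h2 : ¬ (g = w) := fun e => hw e.symm
              simp [extract_kwargs_group_append, h2, hw]
          · rw [hl, extract_kwargs_common_append_matched]
        · have hnone : G.get? g = none :=
            (PySem.Dict.get?_eq_none_iff_not_mem_keys G g).mpr (by rw [hkeys]; exact hg)
          rw [show extract_kwargs_stepA false (G, L) kv = (G, L.insert kv.1 kv.2) by
              simp [extract_kwargs_stepA, hs, hnone],
            show extract_kwargs_classify (PySem.Set.ofList wd) kv = (none, kv.1, kv.2) by
              simp [extract_kwargs_classify, hs, hg],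
            hcons]
          exact ih (es ++ [(none, kv.1, kv.2)]) G _
            (by rw [h]; apply List.map_congr_left; intro w _; rw [extract_kwargs_group_append_common])
            (by rw [hl, extract_kwargs_common_append_common])
      · rw [show extract_kwargs_stepA false (G, L) kv = (G, L.insert kv.1 kv.2) by
            simp [extract_kwargs_stepA, hs],
          show extract_kwargs_classify (PySem.Set.ofList wd) kv = (none, kv.1, kv.2) by
            simp [extract_kwargs_classify, hs],
          hcons]
        exact ih (es ++ [(none, kv.1, kv.2)]) G _
          (by rw [h]; apply List.map_congr_left; intro w _; rw [extract_kwargs_group_append_common])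
          (by rw [hl, extract_kwargs_common_append_common])

-- items characterization of a groups-assembly fold from the empty dict
lemma extract_kwargs_build_ofList (f : String → PySem.Dict String String) (wd : List String) :
    (wd.foldl (fun d w => d.insert w (f w)) PySem.Dict.empty).items
      = (PySem.Set.ofList wd).map (fun k => (k, f k)) := by
  have := extract_kwargs_items_build f wd PySem.Dict.empty (by simp [PySem.Dict.keys, PySem.Dict.empty])
    (by simp [PySem.Dict.keys, PySem.Dict.empty])
  simpa [PySem.Set.ofList, PySem.Set.update, PySem.Dict.keys, PySem.Dict.empty, PySem.Set.empty] using this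

-- ===== VERDICT (by name: the statement is the Claim_ definition above) =====
theorem extract_kwargs_spec : Claim_equal_extract_kwargs := by
  intro kwargs wd merge _ hpre
  have hm : merge = false := hpre
  subst hm
  unfold Spec_extract_kwargs extract_kwargs extract_kwargs_alt
  simp only [if_neg (by simp : ¬ (false = true))]
  rw [extract_kwargs_events_eq (PySem.Set.ofList wd) kwargs []]
  have h0 : (wd.foldl (fun d w => d.insert w PySem.Dict.empty) PySem.Dict.empty).items
      = (PySem.Set.ofList wd).map (fun w => (w, extract_kwargs_group [] w)) := by
    have h := extract_kwargs_build_ofList (fun _ => PySem.Dict.empty) wd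
    have hg : ∀ w, extract_kwargs_group [] w = PySem.Dict.empty := fun w => rfl
    simpa [hg] using h
  obtain ⟨h1, h2⟩ := extract_kwargs_loop_eq wd kwargs [] _ PySem.Dict.empty h0
    (by simp [extract_kwargs_common, PySem.Dict.ofList, PySem.Dict.update, PySem.Dict.empty])
  rw [h1, h2, extract_kwargs_build_ofList (extract_kwargs_group
    ([] ++ kwargs.map (extract_kwargs_classify (PySem.Set.ofList wd)))) wd]
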